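-- pv_equiv track=rewrite | github.com/Nayekah/CTF-Write-Ups | wu-inter/pwnsec2025/3AM/solve.py | x3_formula
-- ===== SOURCE A (Python) =====
-- def inv_mod(a, m):
--     return pow(int(a), -1, int(m))
--
-- def x3_formula(x, a, b, p):
--     """
--     x(3P) = phi3(x)/(psi3(x)^2), with:
--     phi3(x) = x^9
--               - 12a x^7
--               - 96b x^6
--               + 30a^2 x^5
--               - 24ab x^4
--               + (36a^3 + 48b^2) x^3
--               + 48a^2 b x^2
--               + (9a^4 + 96ab^2) x
--               + (8a^3 b + 64 b^3)
--     den3(x) = 9x^8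
--               + 36a x^6
--               + 72b x^5
--               + 30a^2 x^4
--               + 144ab x^3
--               + (-12a^3 + 144b^2) x^2
--               - 24a^2 b x
--               + a^4
--     """
--     x %= p
--     a %= p
--     b %= p
--
--     # phi3 coefficients for x^9 ... x^0
--     c_phi = [
--         1,
--         0,
--         -12*a,
--         -96*b,
--         30*a*a,
--         -24*a*b,
--         36*a*a*a + 48*b*b,
--         48*a*a*b,
--         9*a**4 + 96*a*b*b,
--         8*a**3*b + 64*b**3,
--     ]
--     # den3 coefficients for x^8 ... x^0
--     c_den = [
--         9,
--         0,
--         36*a,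
--         72*b,
--         30*a*a,
--         144*a*b,
--         -12*a**3 + 144*b*b,
--         -24*a*a*b,
--         a**4,
--     ]
--
--     num = 0
--     for c in c_phi:
--         num = (num * x + c) % p
--     den = 0
--     for c in c_den:
--         den = (den * x + c) % p
--
--     return (num * inv_mod(den, p)) % p
-- ===== SOURCE B (Python) =====
-- def inv_mod(a, m):
--     return pow(int(a), -1, int(m))
--
-- def x3_formula(x, a, b, p):
--     x %= p
--     a %= p
--     b %= p
--     num = (x**9 - 12*a*x**7 - 96*b*x**6 + 30*a*a*x**5 - 24*a*b*x**4
--            + (36*a**3 + 48*b*b)*x**3 + 48*a*a*b*x*x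
--            + (9*a**4 + 96*a*b*b)*x + (8*a**3*b + 64*b**3)) % p
--     den = (9*x**8 + 36*a*x**6 + 72*b*x**5 + 30*a*a*x**4 + 144*a*b*x**3
--            + (-12*a**3 + 144*b*b)*x*x - 24*a*a*b*x + a**4) % p
--     return num * inv_mod(den, p) % p
-- ===== Notes on version B (the rewrite author's own statement) =====
-- stated objective: simpler
-- what changed: Replaces A's coefficient lists and two Horner accumulation loops with two loop-free closed-form polynomial expressions reduced mod p once each; the same modular-inverse call keeps the exception behaviour identical.
-- outside the precondition, e.g. on x3_formula(1, 1, 1, 0): A raises ZeroDivisionError, B raises ZeroDivisionError; on x3_formula(0, 0, 1, 5): A raises ValueError, B raises ValueError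
import Mathlib
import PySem

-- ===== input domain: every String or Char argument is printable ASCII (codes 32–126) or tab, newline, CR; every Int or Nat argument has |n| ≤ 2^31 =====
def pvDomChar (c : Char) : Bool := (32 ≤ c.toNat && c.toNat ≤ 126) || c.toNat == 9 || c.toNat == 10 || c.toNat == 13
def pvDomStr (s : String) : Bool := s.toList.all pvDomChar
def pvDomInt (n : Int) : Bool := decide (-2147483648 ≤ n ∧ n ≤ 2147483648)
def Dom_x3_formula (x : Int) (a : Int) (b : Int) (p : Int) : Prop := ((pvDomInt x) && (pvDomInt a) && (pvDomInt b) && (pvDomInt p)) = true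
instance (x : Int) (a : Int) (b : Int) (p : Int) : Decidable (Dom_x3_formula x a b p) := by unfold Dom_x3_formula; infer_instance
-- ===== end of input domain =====

-- B replaces A's coefficient lists and Horner accumulation loops with two loop-free
-- closed-form polynomial expressions reduced mod p once each (simpler; same cost,
-- same modular-inverse call so the exception behaviour is identical).

-- Python's pow(a, -1, m): exact on the inputs admitted by Pre_ (m ≠ 0 and gcd(a, m) = 1;
-- elsewhere Python raises). Int.gcdA gives Bezout's coefficient, PySem.Int.mod gives it
-- Python's canonical sign-of-modulus representative.
def inv_mod (a : Int) (m : Int) : Int := PySem.Int.mod (Int.gcdA a m) m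

-- ===== PORT A =====
def x3_formula (x : Int) (a : Int) (b : Int) (p : Int) : Int :=
  let x := PySem.Int.mod x p
  let a := PySem.Int.mod a p
  let b := PySem.Int.mod b p
  let c_phi : List Int :=
    [1, 0, -12*a, -96*b, 30*a*a, -24*a*b, 36*a*a*a + 48*b*b, 48*a*a*b,
     9*a^4 + 96*a*b*b, 8*a^3*b + 64*b^3]
  let c_den : List Int :=
    [9, 0, 36*a, 72*b, 30*a*a, 144*a*b, -12*a^3 + 144*b*b, -24*a*a*b, a^4]
  let num := c_phi.foldl (fun num c => PySem.Int.mod (num * x + c) p) 0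
  let den := c_den.foldl (fun den c => PySem.Int.mod (den * x + c) p) 0
  PySem.Int.mod (num * inv_mod den p) p

-- ===== PORT B =====
def x3_formula_alt (x : Int) (a : Int) (b : Int) (p : Int) : Int :=
  let x := PySem.Int.mod x p
  let a := PySem.Int.mod a p
  let b := PySem.Int.mod b p
  let num := PySem.Int.mod
    (x^9 - 12*a*x^7 - 96*b*x^6 + 30*a*a*x^5 - 24*a*b*x^4
      + (36*a^3 + 48*b*b)*x^3 + 48*a*a*b*x*x
      + (9*a^4 + 96*a*b*b)*x + (8*a^3*b + 64*b^3)) p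
  let den := PySem.Int.mod
    (9*x^8 + 36*a*x^6 + 72*b*x^5 + 30*a*a*x^4 + 144*a*b*x^3
      + (-12*a^3 + 144*b*b)*x*x - 24*a*a*b*x + a^4) p
  PySem.Int.mod (num * inv_mod den p) p

-- ===== PRECONDITION & SPEC =====
-- Pre_ excludes exactly the inputs where A raises: p = 0 (ZeroDivisionError from x %= p)
-- and non-invertible denominators (pow(den, -1, p) raises ValueError when gcd(den3, p) ≠ 1).
def Pre_x3_formula (x : Int) (a : Int) (b : Int) (p : Int) : Prop :=
  p ≠ 0 ∧
  Int.gcd (9*x^8 + 36*a*x^6 + 72*b*x^5 + 30*a*a*x^4 + 144*a*b*x^3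
           + (-12*a^3 + 144*b*b)*x^2 - 24*a*a*b*x + a^4) p = 1
instance (x : Int) (a : Int) (b : Int) (p : Int) : Decidable (Pre_x3_formula x a b p) := by
  unfold Pre_x3_formula; infer_instance

def pvWitness_x3_formula : Int × Int × Int × Int := (0, 1, 0, 5)

def Spec_x3_formula (x : Int) (a : Int) (b : Int) (p : Int) (out : Int) : Prop := out = x3_formula_alt x a b p
instance (x : Int) (a : Int) (b : Int) (p : Int) (out : Int) : Decidable (Spec_x3_formula x a b p out) := by unfold Spec_x3_formula; infer_instance

-- ===== CLAIM (what is proved, stated in full; the proofs are below) =====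
def Claim_equal_x3_formula : Prop := ∀ (x : Int) (a : Int) (b : Int) (p : Int), Dom_x3_formula x a b p → Pre_x3_formula x a b p → Spec_x3_formula x a b p (x3_formula x a b p)

-- ===== LEMMAS AND PROOFS =====

-- mod is invariant under adding a multiple of the modulus
theorem pm_shift (a k p : Int) : PySem.Int.mod (a + p * k) p = PySem.Int.mod a p := by
  simp [PySem.Int.mod]

theorem pm_congr {a b p : Int} (h : p ∣ a - b) : PySem.Int.mod a p = PySem.Int.mod b p := by
  obtain ⟨k, hk⟩ := h
  have : a = b + p * k := by linarith
  rw [this, pm_shift]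

-- casting a Python-mod residue into ZMod |p| forgets the reduction
theorem pm_cast (p u : Int) :
    ((PySem.Int.mod u p : Int) : ZMod p.natAbs) = (u : ZMod p.natAbs) := by
  have h := PySem.Int.floordiv_mul_add_mod u p
  have hm : PySem.Int.mod u p = u - PySem.Int.floordiv u p * p := by linarith
  have hp : ((p : Int) : ZMod p.natAbs) = 0 := by
    rw [ZMod.intCast_zmod_eq_zero_iff_dvd]
    exact Int.natAbs_dvd.mpr dvd_rfl
  rw [hm]
  push_cast
  rw [hp]
  ring

-- two Python-mod values agree as soon as their arguments agree in ZMod |p|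
theorem pm_eq_of_zmod {p : Int} {s t : Int}
    (h : ((s : Int) : ZMod p.natAbs) = (t : ZMod p.natAbs)) :
    PySem.Int.mod s p = PySem.Int.mod t p := by
  apply pm_congr
  have h2 : s ≡ t [ZMOD ((p.natAbs : Nat) : Int)] := (ZMod.intCast_eq_intCast_iff _ _ _).mp h
  have h3 : ((p.natAbs : Nat) : Int) ∣ t - s := Int.ModEq.dvd h2
  have h4 : p ∣ t - s := Int.natAbs_dvd.mp h3
  have h5 : p ∣ -(t - s) := dvd_neg.mpr h4
  simpa [neg_sub] using h5

theorem core (x a b p : Int) : x3_formula x a b p = x3_formula_alt x a b p := by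
  unfold x3_formula x3_formula_alt
  simp only [List.foldl]
  have hd : ∀ dA dB : Int, dA = dB → inv_mod dA p = inv_mod dB p := fun _ _ h => by rw [h]
  congr 1
  congr 1
  · apply pm_eq_of_zmod
    push_cast [pm_cast]
    ring
  · apply hd
    apply pm_eq_of_zmod
    push_cast [pm_cast]
    ring

-- ===== VERDICT (by name: the statement is the Claim_ definition above) =====
theorem x3_formula_spec : Claim_equal_x3_formula := by
  intro x a b p _ _
  unfold Spec_x3_formula
  exact core x a b p
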